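-- pv_equiv track=rewrite | github.com/TsXor/my_opencv_scripts | text_embedding_helper/lib_scripts/psoperate.py | str2lines
-- ===== SOURCE A (Python) =====
-- def str2lines(text):
--     rangelist = []; last = 0
--     while True:
--         i = text.find('\r',last)
--         if i == -1:
--             break
--         rangelist.append((last,i))
--         last = i+1
--     return rangelist
-- ===== SOURCE B (Python) =====
-- def str2lines(text):
--     idxs = [i for i, c in enumerate(text) if c == '\r']
--     starts = [0] + [i + 1 for i in idxs[:-1]]
--     return list(zip(starts, idxs))
-- ===== Notes on version B (the rewrite author's own statement) =====
-- stated objective: simpler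
-- what changed: Replaces the advancing find-based while loop with one pass that gathers all carriage-return positions, then zips them with the shifted start offsets.
import Mathlib
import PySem

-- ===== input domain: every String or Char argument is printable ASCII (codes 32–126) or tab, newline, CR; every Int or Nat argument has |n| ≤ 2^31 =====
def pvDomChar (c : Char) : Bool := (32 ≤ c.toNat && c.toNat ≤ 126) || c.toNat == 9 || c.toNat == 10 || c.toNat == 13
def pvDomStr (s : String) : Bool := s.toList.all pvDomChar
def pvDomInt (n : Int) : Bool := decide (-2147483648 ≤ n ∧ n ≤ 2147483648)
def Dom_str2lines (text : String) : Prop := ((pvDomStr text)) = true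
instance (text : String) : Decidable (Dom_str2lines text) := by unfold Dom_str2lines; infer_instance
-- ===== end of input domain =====

-- B replaces A's advancing find-based while loop by one gather pass over all '\r' positions
-- followed by an offset/zip pass (objective: simpler decomposition; same cost).

-- ===== PORT A =====
-- A's `while True` loop as recursion on the remaining suffix; `hlast` is the loop
-- invariant `last ≤ len(text)` (true in Python since last = i+1 with i an index), used only for termination.
def str2linesGo (cs : List Char) (last : Nat) (hlast : last ≤ cs.length) : List (Int × Int) :=
  let i := PySem.Chars.findFrom cs ['\r'] (last : Int) none
  if hi : i = -1 then []
  else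
    have spec := PySem.Chars.findFrom_natCast_spec cs ['\r'] last hlast hi
    have hlt : i.toNat < cs.length := by
      rcases spec.2.1 with ⟨t, ht⟩
      have := congrArg List.length ht
      simp [List.length_drop] at this
      omega
    ((last : Int), i) :: str2linesGo cs (i.toNat + 1) (by omega)
termination_by cs.length - last
decreasing_by
  have _h1 : (last : Int) ≤ PySem.Chars.findFrom cs ['\r'] (last : Int) none := spec.1
  omega

def str2lines (text : String) : List (Int × Int) :=
  str2linesGo text.toList 0 (Nat.zero_le _)

-- ===== PORT B =====
def str2lines_alt (text : String) : List (Int × Int) :=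
  let idxs := ((PySem.List.enumerate text.toList 0).filter (fun p => p.2 == '\r')).map (fun p => p.1)
  let starts := (0 : Int) :: (PySem.List.slice idxs none (some (-1))).map (fun i => i + 1)
  starts.zip idxs

-- ===== PRECONDITION & SPEC =====
def Spec_str2lines (text : String) (out : List (Int × Int)) : Prop := out = str2lines_alt text
instance (text : String) (out : List (Int × Int)) : Decidable (Spec_str2lines text out) := by unfold Spec_str2lines; infer_instance

-- ===== CLAIM (what is proved, stated in full; the proofs are below) =====
def Claim_equal_str2lines : Prop := ∀ (text : String), Dom_str2lines text → Spec_str2lines text (str2lines text)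

-- ===== LEMMAS AND PROOFS =====

/-- The list of positions of '\r' in `cs`, offset by `s`. -/
def rIdxs : List Char → Nat → List Nat
  | [], _ => []
  | c :: cs, s => if c = '\r' then s :: rIdxs cs (s+1) else rIdxs cs (s+1)

theorem enum_filter_map_eq_rIdxs (cs : List Char) (s : Nat) :
    (((PySem.List.enumerate cs (s : Int)).filter (fun p => p.2 == '\r')).map (fun p => p.1))
      = (rIdxs cs s).map (fun n => Int.ofNat n) := by
  induction cs generalizing s with
  | nil => simp [rIdxs, PySem.List.enumerate_nil]
  | cons c cs ih =>
    rw [PySem.List.enumerate_cons, show ((s : Int) + 1) = ((s + 1 : Nat) : Int) by push_cast; ring]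
    by_cases hc : c = '\r'
    · rw [List.filter_cons_of_pos (by simp [hc]), List.map_cons, ih]
      simp [rIdxs, hc, Int.ofNat_eq_natCast]
    · rw [List.filter_cons_of_neg (by simp [hc]), ih]
      simp [rIdxs, hc, Int.ofNat_eq_natCast]

theorem singleton_prefix_drop_iff (cs : List Char) (j : Nat) :
    (['\r'] <+: cs.drop j) ↔ cs[j]? = some '\r' := by
  constructor
  · rintro ⟨t, ht⟩
    have : (cs.drop j)[0]? = some '\r' := by rw [← ht]; simp
    simpa using this
  · intro h
    have hj : j < cs.length := by
      by_contra hh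
      simp [List.getElem?_eq_none (le_of_not_gt hh)] at h
    have hv : cs[j] = '\r' := by
      have := List.getElem?_eq_getElem hj
      rw [this] at h; exact Option.some.inj h
    refine ⟨cs.drop (j+1), ?_⟩
    rw [List.drop_eq_getElem_cons hj, hv]
    simp

theorem find_cr_eq (cs : List Char) :
    PySem.Chars.find cs ['\r']
      = (match List.findIdx? (fun c => c == '\r') cs with
         | none => -1
         | some d => (d : Int)) := by
  cases h : List.findIdx? (fun c => c == '\r') cs with
  | none =>
    have hnm : '\r' ∉ cs := by
      intro hm
      have := List.findIdx?_eq_none_iff.mp h '\r' hm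
      simp at this
    rw [PySem.Chars.find_eq_neg_one_iff]
    intro hinf
    exact hnm (List.singleton_sublist.mp hinf.sublist)
  | some d =>
    show PySem.Chars.find cs ['\r'] = (d : Int)
    obtain ⟨hd, hpd, hmin⟩ := List.findIdx?_eq_some_iff_getElem.mp h
    have hprefd : ['\r'] <+: cs.drop d := by
      rw [singleton_prefix_drop_iff]
      rw [List.getElem?_eq_getElem hd]
      simpa using hpd
    have hinf : ['\r'] <:+: cs := hprefd.isInfix.trans (List.drop_suffix d cs).isInfix
    have hnn : 0 ≤ PySem.Chars.find cs ['\r'] := (PySem.Chars.find_nonneg_iff cs ['\r']).mpr hinf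
    obtain ⟨hp, hm⟩ := PySem.Chars.find_spec hnn
    have hF : cs[(PySem.Chars.find cs ['\r']).toNat]? = some '\r' :=
      (singleton_prefix_drop_iff cs _).mp hp
    have hFd : (PySem.Chars.find cs ['\r']).toNat = d := by
      rcases Nat.lt_trichotomy (PySem.Chars.find cs ['\r']).toNat d with hlt | heq | hgt
      · exfalso
        have hFlt : (PySem.Chars.find cs ['\r']).toNat < cs.length := by
          by_contra hh
          rw [List.getElem?_eq_none (le_of_not_gt hh)] at hF
          simp at hF
        have := hmin _ hlt
        rw [List.getElem?_eq_getElem hFlt] at hF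
        simp [Option.some.inj hF] at this
      · exact heq
      · exact absurd hprefd (hm d hgt)
    omega

theorem rIdxs_split (cs : List Char) (s : Nat) :
    rIdxs cs s
      = (match List.findIdx? (fun c => c == '\r') cs with
         | none => []
         | some d => (s + d) :: rIdxs (cs.drop (d+1)) (s + d + 1)) := by
  induction cs generalizing s with
  | nil => simp [rIdxs]
  | cons c cs ih =>
    by_cases hc : c = '\r'
    · simp [rIdxs, hc, List.findIdx?_cons]
    · have hb : (c == '\r') = false := by simp [hc]
      rw [List.findIdx?_cons]
      simp only [hb, Bool.false_eq_true, if_false]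
      cases hfi : List.findIdx? (fun c => c == '\r') cs with
      | none => simp [rIdxs, hc, ih, hfi]
      | some d =>
        simp only [Option.map_some]
        have := ih (s+1)
        rw [hfi] at this
        simp [rIdxs, hc, this]
        exact ⟨by omega, by rw [show s + 1 + d + 1 = s + (d + 1) + 1 from by omega]⟩

theorem rIdxs_split_none (cs : List Char) (s : Nat)
    (hfi : List.findIdx? (fun c => c == '\r') cs = none) : rIdxs cs s = [] := by
  have h := rIdxs_split cs s; rw [hfi] at h; exact h

theorem rIdxs_split_some (cs : List Char) (s : Nat) (d : Nat)
    (hfi : List.findIdx? (fun c => c == '\r') cs = some d) :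
    rIdxs cs s = (s + d) :: rIdxs (cs.drop (d+1)) (s + d + 1) := by
  have h := rIdxs_split cs s; rw [hfi] at h; exact h

/-- B's result expressed over the Nat index list. -/
def BN (l : List Nat) (last : Nat) : List (Int × Int) :=
  (Int.ofNat last :: l.dropLast.map (fun n => Int.ofNat n + 1)).zip (l.map (fun n => Int.ofNat n))

theorem BN_cons (i : Nat) (rest : List Nat) (last : Nat) :
    BN (i :: rest) last = ((last : Int), (i : Int)) :: BN rest (i + 1) := by
  cases rest <;> simp [BN, Int.ofNat_eq_natCast]

theorem go_eq_BN (n : Nat) : ∀ (cs : List Char) (last : Nat) (h : last ≤ cs.length),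
    cs.length - last ≤ n → str2linesGo cs last h = BN (rIdxs (cs.drop last) last) last := by
  induction n with
  | zero =>
    intro cs last h hn
    have hdrop : cs.drop last = [] := List.drop_eq_nil_iff.mpr (by omega)
    have hm1 : PySem.Chars.findFrom cs ['\r'] (last : Int) none = -1 := by
      rw [PySem.Chars.findFrom_natCast cs ['\r'] last h, hdrop]
      simp [PySem.Chars.find_eq_neg_one_iff]
    rw [str2linesGo]
    simp [hm1, hdrop, rIdxs, BN]
  | succ m ihm =>
    intro cs last h hn
    have hff := PySem.Chars.findFrom_natCast cs ['\r'] last h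
    cases hfi : List.findIdx? (fun c => c == '\r') (cs.drop last) with
    | none =>
      have hfind : PySem.Chars.find (cs.drop last) ['\r'] = -1 := by
        rw [find_cr_eq, hfi]
      have hm1 : PySem.Chars.findFrom cs ['\r'] (last : Int) none = -1 := by
        rw [hff, hfind]; simp
      rw [str2linesGo, rIdxs_split_none (cs.drop last) last hfi]
      simp [hm1, BN]
    | some d =>
      have hfind : PySem.Chars.find (cs.drop last) ['\r'] = (d : Int) := by
        rw [find_cr_eq, hfi]
      obtain ⟨hdlt, _, _⟩ := List.findIdx?_eq_some_iff_getElem.mp hfi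
      have hdlen : last + d < cs.length := by
        rw [List.length_drop] at hdlt; omega
      have hival : PySem.Chars.findFrom cs ['\r'] (last : Int) none = (last : Int) + d := by
        rw [hff, hfind]
        rw [if_neg (by omega)]
      rw [str2linesGo]
      simp only [hival]
      rw [dif_neg (by omega)]
      rw [rIdxs_split_some (cs.drop last) last d hfi, List.drop_drop,
          show last + (d + 1) = last + d + 1 from by omega, BN_cons]
      rw [show ((last + d : Nat) : Int) = (last : Int) + d from by push_cast; ring]
      congr 1
      exact ihm cs (last + d + 1) (by omega) (by omega)

theorem dropLast_map' {α β : Type} (l : List α) (f : α → β) :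
    (l.map f).dropLast = l.dropLast.map f := by
  induction l with
  | nil => simp
  | cons a t ih =>
    cases t with
    | nil => simp
    | cons b u => simp_all [List.dropLast_cons_of_ne_nil]

theorem alt_eq_BN (text : String) : str2lines_alt text = BN (rIdxs text.toList 0) 0 := by
  rw [str2lines_alt]
  have he := enum_filter_map_eq_rIdxs text.toList 0
  simp only [Nat.cast_zero] at he
  simp only [he, PySem.List.slice_to_neg_one, BN]
  rw [dropLast_map']
  simp [Function.comp_def]

theorem str2lines_spec : Claim_equal_str2lines := by
  intro text _
  show str2lines text = str2lines_alt text
  rw [str2lines, alt_eq_BN]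
  have := go_eq_BN text.toList.length text.toList 0 (Nat.zero_le _) (by omega)
  rwa [List.drop_zero] at this
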